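-- pv_equiv track=rewrite | github.com/jdb19937/kadc | κadc.py | segmenta
-- ===== SOURCE A (Python) =====
-- SEG_CODEX      = 0
--
-- SEG_COMMENTUM  = 1
--
-- SEG_CHORDA     = 2
--
-- SEG_LITTERA    = 3
--
-- def segmenta(fons):
--     """Fontem in (genus, textus) segmenta dividit."""
--     partes = []
--     i = 0
--     n = len(fons)
--     alveus = []
--     modus = SEG_CODEX
--
--     def effunde():
--         if alveus:
--             partes.append((modus, ''.join(alveus)))
--             alveus.clear()
--
--     while i < n:
--         if modus == SEG_CODEX:
--             if fons[i:i+2] == '/*':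
--                 effunde()
--                 modus = SEG_COMMENTUM
--                 alveus.append('/*')
--                 i += 2
--             elif fons[i] == '"':
--                 effunde()
--                 modus = SEG_CHORDA
--                 alveus.append('"')
--                 i += 1
--             elif fons[i] == "'":
--                 effunde()
--                 modus = SEG_LITTERA
--                 alveus.append("'")
--                 i += 1
--             else:
--                 alveus.append(fons[i])
--                 i += 1
--
--         elif modus == SEG_COMMENTUM:
--             if fons[i:i+2] == '*/':
--                 alveus.append('*/')
--                 i += 2
--                 effunde()
--                 modus = SEG_CODEX
--             else:
--                 alveus.append(fons[i])
--                 i += 1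
--
--         elif modus == SEG_CHORDA:
--             if fons[i] == '\\' and i + 1 < n:
--                 alveus.append(fons[i:i+2])
--                 i += 2
--             elif fons[i] == '"':
--                 alveus.append('"')
--                 i += 1
--                 effunde()
--                 modus = SEG_CODEX
--             else:
--                 alveus.append(fons[i])
--                 i += 1
--
--         elif modus == SEG_LITTERA:
--             if fons[i] == '\\' and i + 1 < n:
--                 alveus.append(fons[i:i+2])
--                 i += 2
--             elif fons[i] == "'":
--                 alveus.append("'")
--                 i += 1
--                 effunde()
--                 modus = SEG_CODEX
--             else:
--                 alveus.append(fons[i])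
--                 i += 1
--
--     effunde()
--     return partes
-- ===== SOURCE B (Python) =====
-- SEG_CODEX      = 0
-- SEG_COMMENTUM  = 1
-- SEG_CHORDA     = 2
-- SEG_LITTERA    = 3
--
-- def segmenta(fons):
--     """Fontem in (genus, textus) segmenta dividit."""
--     partes = []
--     s = fons
--     while s:
--         jc = s.find('/*')
--         jq = s.find('"')
--         ja = s.find("'")
--         cands = [j for j in (jc, jq, ja) if j != -1]
--         if not cands:
--             partes.append((SEG_CODEX, s))
--             break
--         j = min(cands)
--         if j:
--             partes.append((SEG_CODEX, s[:j]))
--         s = s[j:]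
--         if jc == j:
--             k = s.find('*/', 2)
--             if k == -1:
--                 partes.append((SEG_COMMENTUM, s))
--                 break
--             partes.append((SEG_COMMENTUM, s[:k + 2]))
--             s = s[k + 2:]
--         else:
--             q = s[0]
--             m = SEG_CHORDA if q == '"' else SEG_LITTERA
--             n = len(s)
--             k = 1
--             while k < n:
--                 if s[k] == '\\' and k + 1 < n:
--                     k += 2
--                 elif s[k] == q:
--                     k += 1
--                     break
--                 else:
--                     k += 1
--             partes.append((m, s[:k]))
--             s = s[k:]
--     return partes
-- ===== Notes on version B (the rewrite author's own statement) =====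
-- stated objective: faster
-- what changed: Replaced the char-by-char four-state automaton that appends every character to a buffer with delimiter jumping: each code chunk is located with str.find of the next comment opener or quote and emitted as one slice, comments end at a single find, and literals are closed by one forward index scan, so no per-character buffer is maintained.
import Mathlib
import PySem

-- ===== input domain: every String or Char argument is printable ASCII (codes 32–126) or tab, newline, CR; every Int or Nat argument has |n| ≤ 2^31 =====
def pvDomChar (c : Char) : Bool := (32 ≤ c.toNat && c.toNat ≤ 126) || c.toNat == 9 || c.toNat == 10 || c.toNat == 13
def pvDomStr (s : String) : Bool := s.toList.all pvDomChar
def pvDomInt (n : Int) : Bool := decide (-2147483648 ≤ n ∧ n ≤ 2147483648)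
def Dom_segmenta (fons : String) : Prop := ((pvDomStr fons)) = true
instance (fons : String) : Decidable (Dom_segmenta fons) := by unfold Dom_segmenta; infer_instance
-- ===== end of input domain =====

-- B replaces A's char-by-char buffer-appending state machine with delimiter jumping (find the next comment opener or quote, emit whole slices); same O(n), large constant-factor speedup measured; return-value equivalence.

-- ===== PORT A =====
-- A's `effunde`: flush the buffer as a segment if non-empty.
def pvFlush (m : Int) (buf : List Char) (rest : List (Int × String)) : List (Int × String) :=
  if buf = [] then rest else (m, String.ofList buf) :: rest

-- A's while loop: state = (modus, alveus, remaining suffix); partes built as the result.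
def segA (m : Int) (buf : List Char) : List Char → List (Int × String)
  | [] => pvFlush m buf []
  | c :: cs =>
    if m = 0 then
      if c = '/' ∧ cs.head? = some '*' then pvFlush 0 buf (segA 1 ['/', '*'] cs.tail)
      else if c = '"' then pvFlush 0 buf (segA 2 ['"'] cs)
      else if c = '\'' then pvFlush 0 buf (segA 3 ['\''] cs)
      else segA 0 (buf ++ [c]) cs
    else if m = 1 then
      if c = '*' ∧ cs.head? = some '/' then pvFlush 1 (buf ++ ['*', '/']) (segA 0 [] cs.tail)
      else segA 1 (buf ++ [c]) cs
    else if m = 2 then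
      if c = '\\' ∧ cs ≠ [] then segA 2 (buf ++ c :: cs.take 1) cs.tail
      else if c = '"' then pvFlush 2 (buf ++ ['"']) (segA 0 [] cs)
      else segA 2 (buf ++ [c]) cs
    else
      if c = '\\' ∧ cs ≠ [] then segA 3 (buf ++ c :: cs.take 1) cs.tail
      else if c = '\'' then pvFlush 3 (buf ++ ['\'']) (segA 0 [] cs)
      else segA 3 (buf ++ [c]) cs
  termination_by l => l.length
  decreasing_by all_goals (cases cs <;> simp [List.tail])

def segmenta (fons : String) : List (Int × String) := segA 0 [] fons.toList

-- ===== PORT B =====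
-- Python's s.find(pat): index of the first occurrence, none if absent.
def pvFindSub (pat : List Char) : List Char → Option Nat
  | [] => none
  | c :: cs => if pat.isPrefixOf (c :: cs) then some 0 else (pvFindSub pat cs).map (· + 1)

-- min over the candidate finds (Python's min(cands) over those ≠ -1).
def pvMinOpt : Option Nat → Option Nat → Option Nat
  | none, b => b
  | some a, none => some a
  | some a, some b => some (min a b)

def pvFind3 (s : List Char) : Option Nat :=
  pvMinOpt (pvMinOpt (pvFindSub ['/', '*'] s) (pvFindSub ['"'] s)) (pvFindSub ['\''] s)

-- B's inner literal loop: chars consumed after the opening quote, up to and including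
-- the closing quote q (backslash skips the next char when one exists).
def litScanLen (q : Char) : List Char → Nat
  | [] => 0
  | c :: cs =>
    if c = '\\' ∧ cs ≠ [] then 2 + litScanLen q cs.tail
    else if c = q then 1
    else 1 + litScanLen q cs
  termination_by l => l.length
  decreasing_by all_goals (cases cs <;> simp [List.tail])

theorem pvFind3_nil : pvFind3 [] = none := rfl

-- B's outer loop: jump to the next delimiter, emit slices.
def segB (s : List Char) : List (Int × String) :=
  match hj : pvFind3 s with
  | none => if s = [] then [] else [((0 : Int), String.ofList s)]
  | some j =>
    let code : List (Int × String) := if j = 0 then [] else [((0 : Int), String.ofList (s.take j))]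
    let rest := s.drop j
    code ++
      (if pvFindSub ['/', '*'] s = some j then
        match pvFindSub ['*', '/'] (rest.drop 2) with
        | none => [((1 : Int), String.ofList rest)]
        | some k => ((1 : Int), String.ofList (rest.take (k + 4))) :: segB (rest.drop (k + 4))
      else
        let q := rest.headD ' '
        let m : Int := if q = '"' then 2 else 3
        let k := 1 + litScanLen q rest.tail
        (m, String.ofList (rest.take k)) :: segB (rest.drop k))
  termination_by s.length
  decreasing_by
    · cases s with
      | nil => simp [pvFind3_nil] at hj
      | cons a l => simp [List.length_drop]; omega
    · cases s with
      | nil => simp [pvFind3_nil] at hj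
      | cons a l => simp [List.length_drop, List.length_tail]; omega

def segmenta_alt (fons : String) : List (Int × String) := segB fons.toList

-- ===== PRECONDITION & SPEC =====
def Spec_segmenta (fons : String) (out : List (Int × String)) : Prop := out = segmenta_alt fons
instance (fons : String) (out : List (Int × String)) : Decidable (Spec_segmenta fons out) := by unfold Spec_segmenta; infer_instance

-- ===== CLAIM (what is proved, stated in full; the proofs are below) =====
def Claim_equal_segmenta : Prop := ∀ (fons : String), Dom_segmenta fons → Spec_segmenta fons (segmenta fons)

-- ===== LEMMAS AND PROOFS =====

theorem pvMinOpt_map (a b : Option Nat) :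
    pvMinOpt (a.map (· + 1)) (b.map (· + 1)) = (pvMinOpt a b).map (· + 1) := by
  cases a <;> cases b <;> simp [pvMinOpt] <;> omega

theorem pvFindSub_prefix (pat : List Char) (s : List Char) (j : Nat)
    (h : pvFindSub pat s = some j) : pat.isPrefixOf (s.drop j) = true := by
  induction s generalizing j with
  | nil => simp [pvFindSub] at h
  | cons c cs ih =>
    by_cases hp : pat.isPrefixOf (c :: cs)
    · simp [pvFindSub, hp] at h
      subst h; simpa using hp
    · simp [pvFindSub, hp] at h
      obtain ⟨k, hk, rfl⟩ := h
      simpa using ih k hk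

theorem pvFindSub_lt (pat : List Char) (hpat : pat ≠ []) (s : List Char) (j : Nat)
    (h : pvFindSub pat s = some j) : j < s.length := by
  induction s generalizing j with
  | nil => simp [pvFindSub] at h
  | cons c cs ih =>
    by_cases hp : pat.isPrefixOf (c :: cs)
    · simp [pvFindSub, hp] at h
      subst h; simp
    · simp [pvFindSub, hp] at h
      obtain ⟨k, hk, rfl⟩ := h
      have := ih k hk
      simp; omega

theorem pvMinOpt_eq_or (a b : Option Nat) (j : Nat) (h : pvMinOpt a b = some j) :
    a = some j ∨ b = some j := by
  cases a with
  | none => right; simpa [pvMinOpt] using h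
  | some x =>
    cases b with
    | none => left; simpa [pvMinOpt] using h
    | some y =>
      simp [pvMinOpt] at h
      rcases Nat.le_total x y with hxy | hxy
      · left; rw [← h, Nat.min_eq_left hxy]
      · right; rw [← h, Nat.min_eq_right hxy]

theorem L_comment (cs : List Char) : ∀ buf,
    segA 1 buf cs =
      match pvFindSub ['*', '/'] cs with
      | none => pvFlush 1 (buf ++ cs) []
      | some k => pvFlush 1 (buf ++ cs.take (k + 2)) (segA 0 [] (cs.drop (k + 2))) := by
  induction cs with
  | nil => intro buf; simp [segA, pvFindSub]
  | cons c cs ih =>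
    intro buf
    by_cases h : c = '*' ∧ cs.head? = some '/'
    · obtain ⟨hc, hh⟩ := h
      cases cs with
      | nil => simp at hh
      | cons d cs' =>
        simp at hh
        subst hc hh
        simp [segA, pvFindSub, List.isPrefixOf]
    · have hnp : ¬ (['*', '/'].isPrefixOf (c :: cs)) := by
        cases cs with
        | nil => simp [List.isPrefixOf]
        | cons d cs' =>
          simp [List.isPrefixOf] at h ⊢
          intro hc hd; exact absurd hd.symm (h hc.symm)
      have hstep : segA 1 buf (c :: cs) = segA 1 (buf ++ [c]) cs := by
        simp [segA, h]
      rw [hstep, ih]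
      cases hfind : pvFindSub ['*', '/'] cs with
      | none => simp [pvFindSub, hnp, hfind]
      | some k => simp [pvFindSub, hnp, hfind, List.take_succ_cons, List.drop_succ_cons]

theorem L_lit (q : Char) (m : Int) (hm : (m = 2 ∧ q = '"') ∨ (m = 3 ∧ q = '\'')) (cs : List Char) : ∀ buf,
    segA m buf cs =
      pvFlush m (buf ++ cs.take (litScanLen q cs)) (segA 0 [] (cs.drop (litScanLen q cs))) := by
  rcases hm with ⟨hm, hq⟩ | ⟨hm, hq⟩ <;> subst hm <;> subst hq
  · induction hn : cs.length using Nat.strong_induction_on generalizing cs with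
    | _ n ih =>
      subst hn
      cases cs with
      | nil => intro buf; simp [segA, litScanLen, pvFlush]
      | cons c cs =>
        intro buf
        by_cases hb : c = '\\' ∧ cs ≠ []
        · obtain ⟨hc, hne⟩ := hb
          subst hc
          cases cs with
          | nil => simp at hne
          | cons d cs' =>
            have h1 : segA 2 buf ('\\' :: d :: cs') = segA 2 (buf ++ ['\\', d]) cs' := by
              simp [segA]
            rw [h1, ih cs'.length (by simp) cs' rfl,
              show litScanLen '\"' ('\\' :: d :: cs') = litScanLen '\"' cs' + 1 + 1 from by
                simp [litScanLen]; omega]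
            simp [litScanLen, List.take_succ_cons, List.drop_succ_cons, List.append_assoc]
        · by_cases hc : c = '"'
          · subst hc
            simp [segA, hb, litScanLen, show ('"' : Char) ≠ '\\' from by decide]
          · have h1 : segA 2 buf (c :: cs) = segA 2 (buf ++ [c]) cs := by
              simp [segA, hb, hc]
            rw [h1, ih cs.length (by simp) cs rfl,
              show litScanLen '\"' (c :: cs) = litScanLen '\"' cs + 1 from by
                simp [litScanLen, hb, hc]; omega]
            simp [List.take_succ_cons, List.drop_succ_cons, List.append_assoc]
  · induction hn : cs.length using Nat.strong_induction_on generalizing cs with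
    | _ n ih =>
      subst hn
      cases cs with
      | nil => intro buf; simp [segA, litScanLen, pvFlush]
      | cons c cs =>
        intro buf
        by_cases hb : c = '\\' ∧ cs ≠ []
        · obtain ⟨hc, hne⟩ := hb
          subst hc
          cases cs with
          | nil => simp at hne
          | cons d cs' =>
            have h1 : segA 3 buf ('\\' :: d :: cs') = segA 3 (buf ++ ['\\', d]) cs' := by
              simp [segA]
            rw [h1, ih cs'.length (by simp) cs' rfl,
              show litScanLen '\'' ('\\' :: d :: cs') = litScanLen '\'' cs' + 1 + 1 from by
                simp [litScanLen]; omega]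
            simp [litScanLen, List.take_succ_cons, List.drop_succ_cons, List.append_assoc]
        · by_cases hc : c = '\''
          · subst hc
            simp [segA, hb, litScanLen, show ('\'' : Char) ≠ '\\' from by decide]
          · have h1 : segA 3 buf (c :: cs) = segA 3 (buf ++ [c]) cs := by
              simp [segA, hb, hc]
            rw [h1, ih cs.length (by simp) cs rfl,
              show litScanLen '\'' (c :: cs) = litScanLen '\'' cs + 1 from by
                simp [litScanLen, hb, hc]; omega]
            simp [List.take_succ_cons, List.drop_succ_cons, List.append_assoc]

theorem L_code (cs : List Char) : ∀ buf,
    segA 0 buf cs =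
      match pvFind3 cs with
      | none => pvFlush 0 (buf ++ cs) []
      | some j => pvFlush 0 (buf ++ cs.take j) (segA 0 [] (cs.drop j)) := by
  induction cs with
  | nil => intro buf; simp [pvFind3, pvFindSub, pvMinOpt, segA]
  | cons c cs ih =>
    intro buf
    by_cases h1 : c = '/' ∧ cs.head? = some '*'
    · have h3 : pvFind3 (c :: cs) = some 0 := by
        have hp : pvFindSub ['/', '*'] (c :: cs) = some 0 := by
          obtain ⟨hc, hh⟩ := h1
          cases cs with
          | nil => simp at hh
          | cons d cs' =>
            simp at hh; subst hc hh; simp [pvFindSub, List.isPrefixOf]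
        unfold pvFind3
        rw [hp]
        cases pvFindSub ['"'] (c :: cs) <;> cases pvFindSub ['\''] (c :: cs) <;>
          simp [pvMinOpt]
      rw [h3]
      obtain ⟨hc, hh⟩ := h1
      cases cs with
      | nil => simp at hh
      | cons d cs' =>
        simp at hh; subst hc hh
        simp [segA, pvFlush]
    · by_cases h2 : c = '"'
      · have h3 : pvFind3 (c :: cs) = some 0 := by
          have hp : pvFindSub ['"'] (c :: cs) = some 0 := by
            subst h2; simp [pvFindSub, List.isPrefixOf]
          unfold pvFind3
          rw [hp]
          cases pvFindSub ['/', '*'] (c :: cs) <;> cases pvFindSub ['\''] (c :: cs) <;>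
            simp [pvMinOpt]
        rw [h3]
        subst h2
        simp [segA, h1, pvFlush]
      · by_cases h4 : c = '\''
        · have h3 : pvFind3 (c :: cs) = some 0 := by
            have hp : pvFindSub ['\''] (c :: cs) = some 0 := by
              subst h4; simp [pvFindSub, List.isPrefixOf]
            unfold pvFind3
            rw [hp]
            cases pvFindSub ['/', '*'] (c :: cs) <;> cases pvFindSub ['"'] (c :: cs) <;>
              simp [pvMinOpt]
          rw [h3]
          subst h4
          simp [segA, h1, h2, pvFlush]
        · have hnp1 : ¬ (['/', '*'].isPrefixOf (c :: cs)) := by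
            cases cs with
            | nil => simp [List.isPrefixOf]
            | cons d cs' =>
              simp [List.isPrefixOf] at h1 ⊢
              intro hc hd; exact absurd hd.symm (h1 hc.symm)
          have hnp2 : ¬ (['"'].isPrefixOf (c :: cs)) := by
            simp [List.isPrefixOf]; exact fun h => h2 h.symm
          have hnp3 : ¬ (['\''].isPrefixOf (c :: cs)) := by
            simp [List.isPrefixOf]; exact fun h => h4 h.symm
          have h3 : pvFind3 (c :: cs) = (pvFind3 cs).map (· + 1) := by
            unfold pvFind3
            rw [show pvFindSub ['/', '*'] (c :: cs) = (pvFindSub ['/', '*'] cs).map (· + 1) from by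
                  simp [pvFindSub, hnp1],
                show pvFindSub ['"'] (c :: cs) = (pvFindSub ['"'] cs).map (· + 1) from by
                  simp [pvFindSub, hnp2],
                show pvFindSub ['\''] (c :: cs) = (pvFindSub ['\''] cs).map (· + 1) from by
                  simp [pvFindSub, hnp3],
                pvMinOpt_map, pvMinOpt_map]
          have hstep : segA 0 buf (c :: cs) = segA 0 (buf ++ [c]) cs := by
            simp [segA, h1, h2, h4]
          rw [hstep, ih, h3]
          cases hfind : pvFind3 cs with
          | none => simp
          | some j => simp [List.take_succ_cons, List.drop_succ_cons]

theorem pvFlush_cons (m : Int) (c : Char) (l : List Char) (X : List (Int × String)) :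
    pvFlush m (c :: l) X = (m, String.ofList (c :: l)) :: X := by
  simp [pvFlush]

theorem main_eq (s : List Char) : segA 0 [] s = segB s := by
  induction hn : s.length using Nat.strong_induction_on generalizing s with
  | _ n ih =>
    subst hn
    have hl := L_code s []
    cases hf : pvFind3 s with
    | none =>
      rw [hf] at hl
      simp only [List.nil_append] at hl
      rw [hl, segB]
      split
      · cases s <;> simp [pvFlush]
      · next j heq => rw [hf] at heq; cases heq
    | some j =>
      rw [hf] at hl
      simp only [List.nil_append] at hl
      have hsne : s ≠ [] := by
        intro h; subst h; rw [pvFind3_nil] at hf; cases hf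
      have hjlt : j < s.length := by
        unfold pvFind3 at hf
        rcases pvMinOpt_eq_or _ _ _ hf with h | h
        · rcases pvMinOpt_eq_or _ _ _ h with h' | h'
          · exact pvFindSub_lt _ (by simp) _ _ h'
          · exact pvFindSub_lt _ (by simp) _ _ h'
        · exact pvFindSub_lt _ (by simp) _ _ h
      have hcode : ∀ X, pvFlush 0 (s.take j) X =
          (if j = 0 then [] else [((0 : Int), String.ofList (s.take j))]) ++ X := by
        intro X
        by_cases hj0 : j = 0
        · subst hj0; simp [pvFlush]
        · have htk : s.take j ≠ [] := by
            simp [List.take_eq_nil_iff, hj0, hsne]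
          simp [pvFlush, htk, hj0]
      rw [hl, segB]
      split
      · next heq => rw [hf] at heq; cases heq
      · next j' heq =>
        rw [hf] at heq
        injection heq with heq'
        subst heq'
        rw [hcode]
        congr 1
        by_cases hcom : pvFindSub ['/', '*'] s = some j
        · rw [if_pos hcom]
          have hpre := pvFindSub_prefix _ _ _ hcom
          rw [List.isPrefixOf_iff_prefix] at hpre
          obtain ⟨r, hr⟩ := hpre
          simp only [List.cons_append, List.nil_append] at hr
          rw [← hr]
          have hA : segA 0 [] ('/' :: '*' :: r) = segA 1 ['/', '*'] r := by
            simp [segA, pvFlush]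
          rw [hA, L_comment r ['/', '*']]
          have hrlen : r.length + 2 = s.length - j := by
            have := congrArg List.length hr
            simp at this
            omega
          cases hk : pvFindSub ['*', '/'] (('/' :: '*' :: r).drop 2) with
          | none =>
            simp only [List.drop_succ_cons, List.drop_zero] at hk
            simp only [hk]
            simp [pvFlush]
          | some k =>
            simp only [List.drop_succ_cons, List.drop_zero] at hk
            simp only [hk]
            rw [show k + 4 = k + 2 + 1 + 1 from by omega]
            simp only [List.take_succ_cons, List.drop_succ_cons, List.cons_append,
              List.nil_append]
            rw [pvFlush_cons]
            congr 1
            exact ih (r.drop (k + 2)).length (by simp; omega) _ rfl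
        · rw [if_neg hcom]
          have hlit : pvFindSub ['"'] s = some j ∨ pvFindSub ['\''] s = some j := by
            unfold pvFind3 at hf
            rcases pvMinOpt_eq_or _ _ _ hf with h | h
            · rcases pvMinOpt_eq_or _ _ _ h with h' | h'
              · exact absurd h' hcom
              · exact Or.inl h'
            · exact Or.inr h
          rcases hlit with hq | hq
          · have hpre := pvFindSub_prefix _ _ _ hq
            rw [List.isPrefixOf_iff_prefix] at hpre
            obtain ⟨r, hr⟩ := hpre
            simp only [List.cons_append, List.nil_append] at hr
            rw [← hr]
            have hA : segA 0 [] ('"' :: r) = segA 2 ['"'] r := by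
              simp [segA, pvFlush]
            rw [hA, L_lit '"' 2 (Or.inl ⟨rfl, rfl⟩) r ['"']]
            have hrlen : r.length + 1 = s.length - j := by
              have := congrArg List.length hr
              simp at this
              omega
            simp only [List.headD_cons, List.tail_cons]
            rw [show (1 : Nat) + litScanLen '"' r = litScanLen '"' r + 1 from by omega]
            simp only [List.take_succ_cons, List.drop_succ_cons]
            simp only [List.cons_append, List.nil_append, reduceIte]
            rw [pvFlush_cons]
            congr 1
            exact ih (r.drop (litScanLen '"' r)).length (by simp; omega) _ rfl
          · have hpre := pvFindSub_prefix _ _ _ hq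
            rw [List.isPrefixOf_iff_prefix] at hpre
            obtain ⟨r, hr⟩ := hpre
            simp only [List.cons_append, List.nil_append] at hr
            rw [← hr]
            have hA : segA 0 [] ('\'' :: r) = segA 3 ['\''] r := by
              simp [segA, pvFlush]
            rw [hA, L_lit '\'' 3 (Or.inr ⟨rfl, rfl⟩) r ['\'']]
            have hrlen : r.length + 1 = s.length - j := by
              have := congrArg List.length hr
              simp at this
              omega
            simp only [List.headD_cons, List.tail_cons]
            rw [show (1 : Nat) + litScanLen '\'' r = litScanLen '\'' r + 1 from by omega]
            simp only [List.take_succ_cons, List.drop_succ_cons]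
            simp only [List.cons_append, List.nil_append, reduceIte]
            rw [pvFlush_cons]
            congr 1
            exact ih (r.drop (litScanLen '\'' r)).length (by simp; omega) _ rfl

-- ===== VERDICT (by name: the statement is the Claim_ definition above) =====
theorem segmenta_spec : Claim_equal_segmenta := by
  intro fons _
  unfold Spec_segmenta segmenta segmenta_alt
  exact main_eq fons.toList
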